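-- pv_equiv track=rewrite | github.com/MrHenryD/xelerance-test | solutions.py | fib_odd_numbers
-- ===== SOURCE A (Python) =====
-- def fib_odd_numbers(threshold):
--     def fib(n):
--         if n not in memoize.keys():
--             memoize[n] = _fib(n)
--         return memoize[n]
--
--     def _fib(n):
--         if n < 2:
--             return n
--         else:
--             return fib(n-1) + fib(n-2)
--
--     def sum_odd(numbers):
--         sum_of_odd_numbers = sum([n for n in numbers if n % 2 == 1])
--         return sum_of_odd_numbers
--
--     memoize = {}
--     numbers = []
--     for seq in range(1, threshold):
--         fib_seq = fib(seq)
--         if fib_seq > threshold: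
--             break
--         else:
--             numbers.append(fib_seq)
--
--     sum_odd_numbers = sum_odd(numbers)
--     return sum_odd_numbers
-- ===== SOURCE B (Python) =====
-- def fib_odd_numbers(threshold):
--     total = 0
--     a, b = 0, 1
--     for _ in range(1, threshold):
--         if b > threshold:
--             break
--         if b % 2 == 1:
--             total += b
--         a, b = b, a + b
--     return total
-- ===== Notes on version B (the rewrite author's own statement) =====
-- stated objective: simpler
-- what changed: Replaces the recursive memoized fib helper, the memo dict and the intermediate list with a single loop keeping a running Fibonacci pair and accumulating the odd sum directly.
import Mathlib
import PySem

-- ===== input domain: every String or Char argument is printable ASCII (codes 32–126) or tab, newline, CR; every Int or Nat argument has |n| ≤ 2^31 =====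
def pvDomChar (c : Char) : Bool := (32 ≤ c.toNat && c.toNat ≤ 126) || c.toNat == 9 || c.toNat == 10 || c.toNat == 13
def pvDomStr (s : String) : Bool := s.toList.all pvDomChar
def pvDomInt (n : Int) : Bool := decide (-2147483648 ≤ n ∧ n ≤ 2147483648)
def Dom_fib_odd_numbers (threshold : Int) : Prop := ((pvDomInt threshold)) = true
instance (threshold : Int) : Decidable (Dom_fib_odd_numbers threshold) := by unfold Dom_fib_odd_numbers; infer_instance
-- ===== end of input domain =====

-- B replaces A's recursive memoized fib helper, memo dict and intermediate list by one
-- loop keeping a running Fibonacci pair and accumulating the odd sum directly (simpler).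

-- ===== PORT A =====
-- A's inner `fib`/`_fib` pair with the shared `memoize` dict, threaded explicitly.
def pvFibA (n : Int) (memo : PySem.Dict Int Int) : Int × PySem.Dict Int Int :=
  if memo.contains n then (memo.getD n 0, memo)
  else
    let p :=
      if n < 2 then (n, memo)
      else
        let p1 := pvFibA (n - 1) memo
        let p2 := pvFibA (n - 2) p1.2
        (p1.1 + p2.1, p2.2)
    let m := p.2.insert n p.1
    (m.getD n 0, m)
termination_by n.toNat
decreasing_by all_goals omega

-- A's `for seq in range(1, threshold)` loop with break, building `numbers`.
def pvLoopA (th : Int) : List Int → PySem.Dict Int Int → List Int → List Int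
  | [], _, numbers => numbers
  | seq :: rest, memo, numbers =>
    let p := pvFibA seq memo
    if p.1 > th then numbers else pvLoopA th rest p.2 (numbers ++ [p.1])

-- A's `sum_odd` helper.
def pvSumOdd (xs : List Int) : Int := (xs.filter (fun n => PySem.Int.mod n 2 == 1)).sum

def fib_odd_numbers (threshold : Int) : Int :=
  pvSumOdd (pvLoopA threshold (PySem.List.pyRange 1 threshold 1) PySem.Dict.empty [])

-- ===== PORT B =====
def pvLoopB (th : Int) : List Int → Int × Int → Int → Int
  | [], _, total => total
  | _ :: rest, ab, total =>
    if ab.2 > th then total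
    else pvLoopB th rest (ab.2, ab.1 + ab.2)
           (if PySem.Int.mod ab.2 2 == 1 then total + ab.2 else total)

def fib_odd_numbers_alt (threshold : Int) : Int :=
  pvLoopB threshold (PySem.List.pyRange 1 threshold 1) (0, 1) 0

-- ===== PRECONDITION & SPEC =====
def Spec_fib_odd_numbers (threshold : Int) (out : Int) : Prop := out = fib_odd_numbers_alt threshold
instance (threshold : Int) (out : Int) : Decidable (Spec_fib_odd_numbers threshold out) := by unfold Spec_fib_odd_numbers; infer_instance

-- ===== CLAIM (what is proved, stated in full; the proofs are below) =====
def Claim_equal_fib_odd_numbers : Prop := ∀ (threshold : Int), Dom_fib_odd_numbers threshold → Spec_fib_odd_numbers threshold (fib_odd_numbers threshold)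

-- ===== LEMMAS AND PROOFS =====

-- Mathematical Fibonacci on Int, mirroring A's `_fib` without the memo.
def specFib (n : Int) : Int :=
  if n < 2 then n else specFib (n - 1) + specFib (n - 2)
termination_by n.toNat
decreasing_by all_goals omega

theorem specFib_step (n : Int) (h : ¬ n < 2) :
    specFib n = specFib (n - 1) + specFib (n - 2) := by
  rw [specFib]; simp [h]

-- memo invariant: every stored value is the true Fibonacci value
def MemoOK (memo : PySem.Dict Int Int) : Prop :=
  ∀ k, memo.contains k = true → memo.getD k 0 = specFib k

theorem pvFibA_correct_aux (N : Nat) : ∀ (n : Int), n.toNat ≤ N →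
    ∀ (memo : PySem.Dict Int Int), MemoOK memo →
    (pvFibA n memo).1 = specFib n ∧ MemoOK (pvFibA n memo).2 := by
  induction N using Nat.strong_induction_on with
  | _ N ih =>
    intro n hn memo hm
    rw [pvFibA]
    by_cases hc : memo.contains n = true
    · simp only [hc, if_pos]
      exact ⟨hm n hc, hm⟩
    · simp only [hc, Bool.false_eq_true, if_false]
      by_cases h2 : n < 2
      · have hv : specFib n = n := by rw [specFib]; simp [h2]
        simp only [if_pos h2]
        refine ⟨by simp [hv], ?_⟩
        intro k hk
        rw [PySem.Dict.contains_insert] at hk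
        rw [PySem.Dict.getD_insert]
        by_cases hkn : k = n
        · simp [hkn, hv]
        · simp only [if_neg hkn]
          exact hm k (by simpa [hkn] using hk)
      · simp only [if_neg h2]
        have hN : 2 ≤ N := by omega
        obtain ⟨e1, m1⟩ := ih (N - 1) (by omega) (n - 1) (by omega) memo hm
        obtain ⟨e2, m2⟩ := ih (N - 1) (by omega) (n - 2) (by omega) (pvFibA (n-1) memo).2 m1
        have hv : (pvFibA (n-1) memo).1 + (pvFibA (n-2) (pvFibA (n-1) memo).2).1 = specFib n := by
          rw [e1, e2, specFib_step n h2]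
        refine ⟨by simp [hv], ?_⟩
        intro k hk
        rw [PySem.Dict.contains_insert] at hk
        rw [PySem.Dict.getD_insert]
        by_cases hkn : k = n
        · simp [hkn, hv]
        · simp only [if_neg hkn]
          exact m2 k (by simpa [hkn] using hk)

theorem pvFibA_correct (n : Int) (memo : PySem.Dict Int Int) (hm : MemoOK memo) :
    (pvFibA n memo).1 = specFib n ∧ MemoOK (pvFibA n memo).2 :=
  pvFibA_correct_aux n.toNat n le_rfl memo hm

theorem memoOK_empty : MemoOK PySem.Dict.empty := by
  intro k hk; simp [PySem.Dict.contains_empty] at hk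

theorem sumOdd_append (xs : List Int) (v : Int) :
    pvSumOdd (xs ++ [v]) =
      if PySem.Int.mod v 2 == 1 then pvSumOdd xs + v else pvSumOdd xs := by
  have hm2 : PySem.Int.mod v 2 = v % 2 := PySem.Int.mod_eq_emod_of_pos (by norm_num)
  simp only [pvSumOdd, List.filter_append, List.filter_cons, List.filter_nil, hm2]
  by_cases hv : (v % 2 == 1) = true <;> simp [hv]

theorem loop_eq (th : Int) (L : List Int) : ∀ (s : Int), 1 ≤ s →
    L = PySem.List.pyRange s th 1 →
    ∀ (memo : PySem.Dict Int Int), MemoOK memo → ∀ (numbers : List Int),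
    pvSumOdd (pvLoopA th L memo numbers) =
      pvLoopB th L (specFib (s - 1), specFib s) (pvSumOdd numbers) := by
  induction L with
  | nil => intro s _ _ memo _ numbers; simp [pvLoopA, pvLoopB]
  | cons x rest ih =>
    intro s hs hL memo hm numbers
    by_cases hlt : s < th
    · rw [PySem.List.pyRange_one_cons hlt] at hL
      obtain ⟨hx, hrest⟩ := (List.cons.injEq ..).mp hL
      subst hx
      obtain ⟨hfib, hm'⟩ := pvFibA_correct x memo hm
      simp only [pvLoopA, pvLoopB, hfib]
      by_cases hbr : specFib x > th
      · simp [hbr]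
      · simp only [if_neg hbr]
        have hstep : specFib (x - 1) + specFib x = specFib (x + 1) := by
          rw [specFib_step (x + 1) (by omega)]; ring_nf
        have hrec := ih (x + 1) (by omega) hrest (pvFibA x memo).2 hm'
          (numbers ++ [(pvFibA x memo).1])
        rw [hfib, sumOdd_append] at hrec
        rw [hrec]
        simp only [add_sub_cancel_right, hstep]
    · rw [PySem.List.pyRange_one_eq_nil (by omega)] at hL
      exact absurd hL (by simp)

-- ===== VERDICT (by name: the statement is the Claim_ definition above) =====
theorem fib_odd_numbers_spec : Claim_equal_fib_odd_numbers := by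
  intro threshold _
  unfold Spec_fib_odd_numbers fib_odd_numbers fib_odd_numbers_alt
  have h := loop_eq threshold (PySem.List.pyRange 1 threshold 1) 1 le_rfl rfl
    PySem.Dict.empty memoOK_empty []
  have h0 : specFib 0 = 0 := by rw [specFib]; norm_num
  have h1 : specFib 1 = 1 := by rw [specFib]; norm_num
  rw [h, show (1:Int) - 1 = 0 by decide, h0, h1]
  rfl
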